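-- pv_equiv track=rewrite | github.com/Fadi88/adventofcode19 | 2024/day20/code.py | get_savings
-- ===== SOURCE A (Python) =====
-- from itertools import product, combinations
--
-- def get_savings(distances, jump_size):
--     ret = 0
--     for p in distances:
--         for dx, dy in product(range(-jump_size, jump_size+1), repeat=2):
--             if dx == dy == 0 or abs(dx) + abs(dy) > jump_size:
--                 continue
--             np = (p[0]+dx, p[1]+dy)
--             if np in distances:
--                 initial_cost = distances[p] - distances[np]
--                 cheat_cost = abs(p[0]-np[0]) + abs(p[1]-np[1])
--                 if (initial_cost - cheat_cost) >= 100: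
--                     ret += 1
--     return ret
-- ===== SOURCE B (Python) =====
-- from itertools import combinations
--
-- def get_savings(distances, jump_size):
--     ret = 0
--     for a, b in combinations(distances, 2):
--         d = abs(a[0] - b[0]) + abs(a[1] - b[1])
--         if d <= jump_size and abs(distances[a] - distances[b]) - d >= 100:
--             ret += 1
--     return ret
-- ===== Notes on version B (the rewrite author's own statement) =====
-- stated objective: faster
-- what changed: Replaces A's per-point scan of the whole (2*jump_size+1)^2 offset window with dict lookups by a single pass over unordered key pairs (itertools.combinations), testing |d_a - d_b| - dist >= 100 to capture the one direction that can qualify; cost no longer depends on jump_size.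
import Mathlib
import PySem

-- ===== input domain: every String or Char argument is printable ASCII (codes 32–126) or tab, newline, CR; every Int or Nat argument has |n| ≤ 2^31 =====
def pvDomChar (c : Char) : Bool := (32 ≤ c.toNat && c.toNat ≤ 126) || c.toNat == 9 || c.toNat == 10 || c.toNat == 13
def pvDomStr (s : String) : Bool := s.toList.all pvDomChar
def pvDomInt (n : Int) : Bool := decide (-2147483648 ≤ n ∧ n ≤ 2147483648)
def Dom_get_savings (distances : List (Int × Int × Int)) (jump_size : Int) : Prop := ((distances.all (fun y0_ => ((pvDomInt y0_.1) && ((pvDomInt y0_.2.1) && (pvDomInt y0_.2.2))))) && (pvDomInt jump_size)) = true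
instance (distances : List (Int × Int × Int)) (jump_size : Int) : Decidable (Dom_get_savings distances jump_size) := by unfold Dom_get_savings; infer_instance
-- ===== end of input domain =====

-- B replaces A's (2*jump_size+1)^2 offset-window scan around every point by one pass over
-- unordered key pairs, testing |d_a - d_b| - dist >= 100 (objective: faster, as measured:
-- B's cost does not depend on jump_size).
-- The dict argument is the association list `distances` of triples (x, y, dist).

-- ===== PORT A =====
-- dict membership/lookup `np in distances` / `distances[np]` (keys are the (x, y) components)
def pvGet? (ds : List (Int × Int × Int)) (k : Int × Int) : Option Int :=
  (ds.find? (fun t => t.1 == k.1 && t.2.1 == k.2)).map (fun t => t.2.2)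

def get_savings (distances : List (Int × Int × Int)) (jump_size : Int) : Int :=
  distances.foldl (fun ret p =>
    (PySem.List.pyRange (-jump_size) (jump_size + 1) 1).foldl (fun ret dx =>
      (PySem.List.pyRange (-jump_size) (jump_size + 1) 1).foldl (fun ret dy =>
        if (dx = 0 ∧ dy = 0) ∨ |dx| + |dy| > jump_size then ret
        else
          let np : Int × Int := (p.1 + dx, p.2.1 + dy)
          match pvGet? distances np with
          | none => ret
          | some dnp =>
            let initial_cost := p.2.2 - dnp
            let cheat_cost := |p.1 - np.1| + |p.2.1 - np.2|
            if initial_cost - cheat_cost ≥ 100 then ret + 1 else ret) ret) ret) 0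

-- ===== PORT B =====
-- `for a, b in combinations(distances, 2)` = for each element a, pair it with every later element b
def get_savings_alt (distances : List (Int × Int × Int)) (jump_size : Int) : Int :=
  match distances with
  | [] => 0
  | a :: rest =>
    rest.foldl (fun ret b =>
      let d := |a.1 - b.1| + |a.2.1 - b.2.1|
      if d ≤ jump_size ∧ |a.2.2 - b.2.2| - d ≥ 100 then ret + 1 else ret) 0
    + get_savings_alt rest jump_size

-- ===== PRECONDITION & SPEC =====
-- Pre_ excludes lists with duplicate (x, y) keys: there the dict encoding is ambiguous
-- (a Python dict keeps one entry per key, last value wins, while the list carries both),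
-- so no list-level behaviour is canonical. A raises on no input.
def Pre_get_savings (distances : List (Int × Int × Int)) (jump_size : Int) : Prop :=
  (distances.map (fun t => (t.1, t.2.1))).Nodup

instance (distances : List (Int × Int × Int)) (jump_size : Int) : Decidable (Pre_get_savings distances jump_size) := by
  unfold Pre_get_savings; infer_instance

def pvWitness_get_savings : (List (Int × Int × Int)) × Int := ([(0, 0, 300), (1, 0, 100)], 5)

def Spec_get_savings (distances : List (Int × Int × Int)) (jump_size : Int) (out : Int) : Prop := out = get_savings_alt distances jump_size
instance (distances : List (Int × Int × Int)) (jump_size : Int) (out : Int) : Decidable (Spec_get_savings distances jump_size out) := by unfold Spec_get_savings; infer_instance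

-- ===== CLAIM (what is proved, stated in full; the proofs are below) =====
def Claim_equal_get_savings : Prop := ∀ (distances : List (Int × Int × Int)) (jump_size : Int), Dom_get_savings distances jump_size → Pre_get_savings distances jump_size → Spec_get_savings distances jump_size (get_savings distances jump_size)

-- ===== LEMMAS AND PROOFS =====

def pvManh (p q : Int × Int × Int) : Int := |p.1 - q.1| + |p.2.1 - q.2.1|

def pvQual (j : Int) (p q : Int × Int × Int) : Bool :=
  decide (0 < pvManh p q ∧ pvManh p q ≤ j ∧ p.2.2 - q.2.2 - pvManh p q ≥ 100)

def pvUp (j : Int) (p q : Int × Int × Int) : Bool :=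
  decide (pvManh p q ≤ j ∧ |p.2.2 - q.2.2| - pvManh p q ≥ 100)

def pvAbody (ds : List (Int × Int × Int)) (j : Int) (p : Int × Int × Int) (z : Int × Int) : Bool :=
  if (z.1 = 0 ∧ z.2 = 0) ∨ |z.1| + |z.2| > j then false
  else match pvGet? ds (p.1 + z.1, p.2.1 + z.2) with
    | none => false
    | some dnp => decide (p.2.2 - dnp - (|p.1 - (p.1 + z.1)| + |p.2.1 - (p.2.1 + z.2)|) ≥ 100)

theorem pvGet?_mem {ds : List (Int × Int × Int)} {k : Int × Int} {d : Int}
    (h : pvGet? ds k = some d) : (k.1, k.2, d) ∈ ds := by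
  unfold pvGet? at h
  rcases Option.map_eq_some_iff.mp h with ⟨t, ht, hv⟩
  have hm := List.mem_of_find?_eq_some ht
  have hp := List.find?_some ht
  simp only [Bool.and_eq_true, beq_iff_eq] at hp
  obtain ⟨h1, h2⟩ := hp
  have : (k.1, k.2, d) = t := by
    obtain ⟨x, y, v⟩ := t
    simp_all
  rw [this]; exact hm

theorem pvGet?_of_mem {ds : List (Int × Int × Int)} {q : Int × Int × Int}
    (hnd : (ds.map (fun t => (t.1, t.2.1))).Nodup) (hq : q ∈ ds) :
    pvGet? ds (q.1, q.2.1) = some q.2.2 := by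
  induction ds with
  | nil => simp at hq
  | cons a t ih =>
    simp only [List.map_cons, List.nodup_cons] at hnd
    rcases List.mem_cons.mp hq with h | h
    · subst h
      unfold pvGet?
      simp [List.find?_cons]
    · have hne : ¬(a.1 = q.1 ∧ a.2.1 = q.2.1) := by
        intro ⟨e1, e2⟩
        exact hnd.1 (by exact List.mem_map.mpr ⟨q, h, by simp [e1, e2]⟩)
      unfold pvGet?
      rw [List.find?_cons_of_neg]
      · exact ih hnd.2 h
      · simp only [Bool.and_eq_true, beq_iff_eq]
        exact fun hc => hne ⟨hc.1, hc.2⟩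

theorem pvCountP_flatMap {α β : Type} (l : List α) (f : α → List β) (p : β → Bool) :
    (l.flatMap f).countP p = (l.map (fun a => (f a).countP p)).sum := by
  induction l with
  | nil => rfl
  | cons a t ih => simp [List.flatMap_cons, List.countP_append, ih]

theorem pvInner_count (ds : List (Int × Int × Int)) (j : Int) (p : Int × Int × Int) (r : Int) :
    (PySem.List.pyRange (-j) (j + 1) 1).foldl (fun ret dx =>
      (PySem.List.pyRange (-j) (j + 1) 1).foldl (fun ret dy =>
        if (dx = 0 ∧ dy = 0) ∨ |dx| + |dy| > j then ret
        else
          let np : Int × Int := (p.1 + dx, p.2.1 + dy)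
          match pvGet? ds np with
          | none => ret
          | some dnp =>
            let initial_cost := p.2.2 - dnp
            let cheat_cost := |p.1 - np.1| + |p.2.1 - np.2|
            if initial_cost - cheat_cost ≥ 100 then ret + 1 else ret) ret) r
    = r + (((PySem.List.pyRange (-j) (j + 1) 1).flatMap (fun dx =>
        (PySem.List.pyRange (-j) (j + 1) 1).map (fun dy => (dx, dy)))).countP (pvAbody ds j p) : Int) := by
  have hbody : ∀ (dx : Int) (ret : Int) (dy : Int),
      (if (dx = 0 ∧ dy = 0) ∨ |dx| + |dy| > j then ret
        else
          let np : Int × Int := (p.1 + dx, p.2.1 + dy)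
          match pvGet? ds np with
          | none => ret
          | some dnp =>
            let initial_cost := p.2.2 - dnp
            let cheat_cost := |p.1 - np.1| + |p.2.1 - np.2|
            if initial_cost - cheat_cost ≥ 100 then ret + 1 else ret)
      = if pvAbody ds j p (dx, dy) then ret + 1 else ret := by
    intro dx ret dy
    unfold pvAbody
    by_cases hc : (dx = 0 ∧ dy = 0) ∨ |dx| + |dy| > j
    · simp [hc]
    · simp only [hc, if_neg, if_false]
      cases hg : pvGet? ds (p.1 + dx, p.2.1 + dy) with
      | none => simp [hg]
      | some dnp =>
        simp only [hg]
        by_cases hcond : p.2.2 - dnp - (|p.1 - (p.1 + dx)| + |p.2.1 - (p.2.1 + dy)|) ≥ 100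
        · simp [hcond]
        · simp [hcond]
  have hinner : ∀ (ret dx : Int),
      (PySem.List.pyRange (-j) (j + 1) 1).foldl (fun ret dy =>
        if (dx = 0 ∧ dy = 0) ∨ |dx| + |dy| > j then ret
        else
          let np : Int × Int := (p.1 + dx, p.2.1 + dy)
          match pvGet? ds np with
          | none => ret
          | some dnp =>
            let initial_cost := p.2.2 - dnp
            let cheat_cost := |p.1 - np.1| + |p.2.1 - np.2|
            if initial_cost - cheat_cost ≥ 100 then ret + 1 else ret) ret
      = ret + (((PySem.List.pyRange (-j) (j + 1) 1).countP (fun dy => pvAbody ds j p (dx, dy))) : Int) := by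
    intro ret dx
    rw [PySem.List.foldl_congr_mem _ _ (fun ret dy => if pvAbody ds j p (dx, dy) then ret + 1 else ret) _
        (fun acc x _ => hbody dx acc x)]
    exact PySem.List.foldl_if_add_one _ _ _
  calc (PySem.List.pyRange (-j) (j + 1) 1).foldl _ r
      = (PySem.List.pyRange (-j) (j + 1) 1).foldl (fun ret dx =>
          ret + (((PySem.List.pyRange (-j) (j + 1) 1).countP (fun dy => pvAbody ds j p (dx, dy))) : Int)) r := by
        exact PySem.List.foldl_congr_mem _ _ _ _ (fun acc dx _ => hinner acc dx)
    _ = r + ((PySem.List.pyRange (-j) (j + 1) 1).map (fun dx =>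
          (((PySem.List.pyRange (-j) (j + 1) 1).countP (fun dy => pvAbody ds j p (dx, dy))) : Int))).sum := by
        exact PySem.List.foldl_add _ _ _
    _ = r + (((PySem.List.pyRange (-j) (j + 1) 1).flatMap (fun dx =>
          (PySem.List.pyRange (-j) (j + 1) 1).map (fun dy => (dx, dy)))).countP (pvAbody ds j p) : Int) := by
        rw [pvCountP_flatMap]
        rw [Nat.cast_list_sum]
        simp [List.map_map, Function.comp_def, List.countP_map]

theorem pvAbody_iff (ds : List (Int × Int × Int)) (j : Int) (p : Int × Int × Int) (z : Int × Int) :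
    pvAbody ds j p z = true ↔
      ¬(z.1 = 0 ∧ z.2 = 0) ∧ |z.1| + |z.2| ≤ j ∧
        ∃ dnp, pvGet? ds (p.1 + z.1, p.2.1 + z.2) = some dnp ∧
          p.2.2 - dnp - (|z.1| + |z.2|) ≥ 100 := by
  unfold pvAbody
  have e1 : |p.1 - (p.1 + z.1)| = |z.1| := by
    rw [show p.1 - (p.1 + z.1) = -z.1 by ring, abs_neg]
  have e2 : |p.2.1 - (p.2.1 + z.2)| = |z.2| := by
    rw [show p.2.1 - (p.2.1 + z.2) = -z.2 by ring, abs_neg]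
  by_cases hc : (z.1 = 0 ∧ z.2 = 0) ∨ |z.1| + |z.2| > j
  · simp only [hc, if_true]
    constructor
    · intro h; exact absurd h (by simp)
    · rintro ⟨h1, h2, _⟩
      rcases hc with h | h
      · exact absurd h h1
      · omega
  · simp only [hc, if_false]
    obtain ⟨hc1, hc2⟩ := not_or.mp hc
    have hc2' : |z.1| + |z.2| ≤ j := not_lt.mp hc2
    cases hg : pvGet? ds (p.1 + z.1, p.2.1 + z.2) with
    | none =>
      simp only [hg]
      constructor
      · intro h; exact absurd h (by simp)
      · rintro ⟨_, _, dnp, hd, _⟩; simp at hd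
    | some dnp =>
      simp only [hg, e1, e2, decide_eq_true_eq]
      constructor
      · intro h; exact ⟨hc1, hc2', dnp, rfl, h⟩
      · rintro ⟨_, _, d', hd', hcond⟩
        cases hd'; exact hcond

theorem pvWindow_eq_qual (ds : List (Int × Int × Int)) (j : Int) (p : Int × Int × Int)
    (hnd : (ds.map (fun t => (t.1, t.2.1))).Nodup) :
    (((PySem.List.pyRange (-j) (j + 1) 1).flatMap (fun dx =>
        (PySem.List.pyRange (-j) (j + 1) 1).map (fun dy => (dx, dy)))).countP (pvAbody ds j p))
    = ds.countP (pvQual j p) := by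
  set R := PySem.List.pyRange (-j) (j + 1) 1 with hR
  have hWprod : R.flatMap (fun dx => R.map (fun dy => (dx, dy))) = R ×ˢ R := rfl
  have hRnd : R.Nodup := by rw [hR]; exact PySem.List.nodup_pyRange_one _ _
  have hWnd : (R ×ˢ R).Nodup := hRnd.product hRnd
  have hDs : ds.Nodup := List.Nodup.of_map _ hnd
  rw [hWprod]
  rw [List.countP_eq_length_filter, List.countP_eq_length_filter]
  rw [← List.toFinset_card_of_nodup (hWnd.filter _), ← List.toFinset_card_of_nodup (hDs.filter _)]
  apply Finset.card_nbij'
    (i := fun z => (p.1 + z.1, p.2.1 + z.2, (pvGet? ds (p.1 + z.1, p.2.1 + z.2)).getD 0))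
    (j := fun q => (q.1 - p.1, q.2.1 - p.2.1))
  · -- MapsTo i
    intro z hz
    simp only [Finset.coe_sort_coe, Finset.mem_coe, List.mem_toFinset, List.mem_filter] at hz ⊢
    obtain ⟨hzW, hzA⟩ := hz
    rw [pvAbody_iff] at hzA
    obtain ⟨hz0, hzle, dnp, hg, hcond⟩ := hzA
    refine ⟨?_, ?_⟩
    · have := pvGet?_mem hg
      simpa [hg] using this
    · rw [hg]
      simp only [pvQual, decide_eq_true_eq, pvManh, Option.getD_some]
      have e1 : |p.1 - (p.1 + z.1)| = |z.1| := by
        rw [show p.1 - (p.1 + z.1) = -z.1 by ring, abs_neg]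
      have e2 : |p.2.1 - (p.2.1 + z.2)| = |z.2| := by
        rw [show p.2.1 - (p.2.1 + z.2) = -z.2 by ring, abs_neg]
      rw [e1, e2]
      have hpos : 0 < |z.1| + |z.2| := by
        rcases Classical.em (z.1 = 0) with h1 | h1
        · have h2 : z.2 ≠ 0 := fun h2 => hz0 ⟨h1, h2⟩
          have := abs_pos.mpr h2
          have := abs_nonneg z.1
          omega
        · have := abs_pos.mpr h1
          have := abs_nonneg z.2
          omega
      exact ⟨hpos, hzle, hcond⟩
  · -- MapsTo j
    intro q hq
    simp only [Finset.coe_sort_coe, Finset.mem_coe, List.mem_toFinset, List.mem_filter] at hq ⊢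
    obtain ⟨hqd, hqQ⟩ := hq
    simp only [pvQual, decide_eq_true_eq, pvManh] at hqQ
    obtain ⟨hpos, hle, hcond⟩ := hqQ
    have ha1 : |q.1 - p.1| = |p.1 - q.1| := abs_sub_comm _ _
    have ha2 : |q.2.1 - p.2.1| = |p.2.1 - q.2.1| := abs_sub_comm _ _
    have hb1 := abs_nonneg (p.1 - q.1)
    have hb2 := abs_nonneg (p.2.1 - q.2.1)
    have habs1 := abs_le.mp (show |p.1 - q.1| ≤ j by omega)
    have habs2 := abs_le.mp (show |p.2.1 - q.2.1| ≤ j by omega)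
    constructor
    · refine List.pair_mem_product.mpr ⟨?_, ?_⟩ <;> · rw [hR, PySem.List.mem_pyRange_one]; omega
    · rw [pvAbody_iff]
      dsimp only
      have hk1 : p.1 + (q.1 - p.1) = q.1 := by ring
      have hk2 : p.2.1 + (q.2.1 - p.2.1) = q.2.1 := by ring
      refine ⟨?_, by rw [ha1, ha2]; omega, q.2.2, ?_, by rw [ha1, ha2]; omega⟩
      · rintro ⟨h1, h2⟩
        rw [h1] at ha1; rw [h2] at ha2
        simp at ha1 ha2
        omega
      · simp only [hk1, hk2]
        exact pvGet?_of_mem hnd hqd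
  · -- LeftInvOn
    intro z _
    obtain ⟨z1, z2⟩ := z
    simp only [Prod.mk.injEq]
    constructor <;> ring
  · -- RightInvOn
    intro q hq
    simp only [Finset.coe_sort_coe, Finset.mem_coe, List.mem_toFinset, List.mem_filter] at hq
    obtain ⟨hqd, _⟩ := hq
    have hk1 : p.1 + (q.1 - p.1) = q.1 := by ring
    have hk2 : p.2.1 + (q.2.1 - p.2.1) = q.2.1 := by ring
    simp only [hk1, hk2, pvGet?_of_mem hnd hqd, Option.getD_some]

theorem pvCountP_split {α : Type} (l : List α) (p q r : α → Bool)
    (h : ∀ x ∈ l, (r x = (p x || q x)) ∧ ¬(p x = true ∧ q x = true)) :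
    l.countP p + l.countP q = l.countP r := by
  induction l with
  | nil => rfl
  | cons a t ih =>
    have ha := h a List.mem_cons_self
    have ih' := ih (fun x hx => h x (List.mem_cons_of_mem _ hx))
    have hr := ha.1
    simp only [List.countP_cons]
    cases hpa : p a <;> cases hqa : q a
    · rw [hpa, hqa] at hr; simp at hr; simp [hpa, hqa, hr]; omega
    · rw [hpa, hqa] at hr; simp at hr; simp [hpa, hqa, hr]; omega
    · rw [hpa, hqa] at hr; simp at hr; simp [hpa, hqa, hr]; omega
    · exact absurd ⟨hpa, hqa⟩ ha.2

theorem pvQual_self (j : Int) (p : Int × Int × Int) : pvQual j p p = false := by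
  simp [pvQual, pvManh]

theorem pvManh_comm (p q : Int × Int × Int) : pvManh p q = pvManh q p := by
  unfold pvManh
  rw [abs_sub_comm p.1 q.1, abs_sub_comm p.2.1 q.2.1]

theorem pvManh_pos {p q : Int × Int × Int} (h : (p.1, p.2.1) ≠ (q.1, q.2.1)) :
    0 < pvManh p q := by
  unfold pvManh
  rcases abs_cases (p.1 - q.1) with ⟨e1, s1⟩ | ⟨e1, s1⟩ <;>
    rcases abs_cases (p.2.1 - q.2.1) with ⟨e2, s2⟩ | ⟨e2, s2⟩ <;>
  · by_contra hle
    exact h (by apply Prod.ext <;> dsimp <;> omega)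

theorem pvUp_split {j : Int} {a b : Int × Int × Int} (h : (a.1, a.2.1) ≠ (b.1, b.2.1)) :
    pvUp j a b = (pvQual j a b || pvQual j b a) ∧
      ¬(pvQual j a b = true ∧ pvQual j b a = true) := by
  have hm : 0 < pvManh a b := pvManh_pos h
  have hc : pvManh b a = pvManh a b := (pvManh_comm a b).symm
  constructor
  · rw [Bool.eq_iff_iff]
    simp only [pvUp, pvQual, hc, decide_eq_true_eq, Bool.or_eq_true]
    rcases abs_cases (a.2.2 - b.2.2) with ⟨e, s⟩ | ⟨e, s⟩ <;> rw [e] <;> omega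
  · simp only [pvQual, hc, decide_eq_true_eq, not_and]
    intro h1 h2
    omega

theorem pvAlt_cons (a : Int × Int × Int) (t : List (Int × Int × Int)) (j : Int) :
    get_savings_alt (a :: t) j = (t.countP (pvUp j a) : Int) + get_savings_alt t j := by
  have hb : ∀ (ret : Int) (b : Int × Int × Int),
      (let d := |a.1 - b.1| + |a.2.1 - b.2.1|
       if d ≤ j ∧ |a.2.2 - b.2.2| - d ≥ 100 then ret + 1 else ret)
      = if pvUp j a b then ret + 1 else ret := by
    intro ret b
    simp only [pvUp, pvManh]
    by_cases hc : |a.1 - b.1| + |a.2.1 - b.2.1| ≤ j ∧ |a.2.2 - b.2.2| - (|a.1 - b.1| + |a.2.1 - b.2.1|) ≥ 100 <;>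
      simp [hc]
  show (t.foldl _ 0) + get_savings_alt t j = _
  rw [PySem.List.foldl_congr_mem _ _ (fun ret b => if pvUp j a b then ret + 1 else ret) _
      (fun acc x _ => hb acc x)]
  rw [PySem.List.foldl_if_add_one]
  omega

theorem pvPairing (ds : List (Int × Int × Int)) (j : Int)
    (hnd : (ds.map (fun t => (t.1, t.2.1))).Nodup) :
    (ds.map (fun p => (ds.countP (pvQual j p) : Int))).sum = get_savings_alt ds j := by
  induction ds with
  | nil => rfl
  | cons a t ih =>
    simp only [List.map_cons, List.nodup_cons] at hnd
    obtain ⟨hka, hndt⟩ := hnd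
    have hkey : ∀ b ∈ t, (a.1, a.2.1) ≠ (b.1, b.2.1) := by
      intro b hb he
      exact hka (List.mem_map.mpr ⟨b, hb, he.symm⟩)
    rw [pvAlt_cons, ← ih hndt]
    have hsplit : (t.countP (pvQual j a) : Int) + (t.countP (fun p => pvQual j p a) : Int)
        = (t.countP (pvUp j a) : Int) := by
      have := pvCountP_split t (pvQual j a) (fun p => pvQual j p a) (pvUp j a)
        (fun b hb => by
          have := pvUp_split (j := j) (hkey b hb)
          exact ⟨this.1, this.2⟩)
      exact_mod_cast congrArg (Nat.cast : Nat → Int) this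
    have hmap : (t.map (fun p => ((a :: t).countP (pvQual j p) : Int))).sum
        = (t.map (fun p => (t.countP (pvQual j p) : Int))).sum
          + (t.countP (fun p => pvQual j p a) : Int) := by
      rw [← PySem.List.sum_map_ite_one_zero (fun p => pvQual j p a) t,
        ← PySem.List.sum_map_add_int]
      refine congrArg List.sum (List.map_congr_left ?_)
      intro b _
      simp only [List.countP_cons]
      by_cases hq : pvQual j b a = true <;> simp [hq] <;> push_cast <;> ring
    rw [List.map_cons, List.sum_cons, hmap]
    simp only [List.countP_cons, pvQual_self]
    push_cast
    omega

-- ===== VERDICT (by name: the statement is the Claim_ definition above) =====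
theorem get_savings_spec : Claim_equal_get_savings := by
  intro ds j _ hpre
  unfold Spec_get_savings get_savings
  rw [PySem.List.foldl_congr_mem _ _
      (fun ret p => ret + (((PySem.List.pyRange (-j) (j + 1) 1).flatMap (fun dx =>
        (PySem.List.pyRange (-j) (j + 1) 1).map (fun dy => (dx, dy)))).countP (pvAbody ds j p) : Int)) _
      (fun acc p _ => pvInner_count ds j p acc)]
  rw [PySem.List.foldl_add]
  have hmapeq : ds.map (fun p => (((PySem.List.pyRange (-j) (j + 1) 1).flatMap (fun dx =>
        (PySem.List.pyRange (-j) (j + 1) 1).map (fun dy => (dx, dy)))).countP (pvAbody ds j p) : Int))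
      = ds.map (fun p => (ds.countP (pvQual j p) : Int)) :=
    List.map_congr_left (fun p _ => by rw [pvWindow_eq_qual ds j p hpre])
  rw [hmapeq, zero_add]
  exact pvPairing ds j hpre
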